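-- pv_equiv track=rewrite | github.com/detiuaveiro/ia-tpg-rush-hour-77036_102477_ia | map_methods.py | move_cursor
-- ===== SOURCE A (Python) =====
-- def move_cursor(cursor_coords, final_coords):
--     commands = []
--
--     while cursor_coords != final_coords:
--         if cursor_coords[0] > final_coords[0][0]:
--             commands.append("a")
--             cursor_coords = (cursor_coords[0]-1, cursor_coords[1])
--         elif cursor_coords[0] < final_coords[0][0]:
--             commands.append("d")
--             cursor_coords = (cursor_coords[0]+1, cursor_coords[1])
--         elif cursor_coords[1] > final_coords[0][1]:
--             commands.append("w")
--             cursor_coords = (cursor_coords[0], cursor_coords[1]-1)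
--         elif cursor_coords[1] < final_coords[0][1]:
--             commands.append("s")
--             cursor_coords = (cursor_coords[0], cursor_coords[1]+1)
--         else:
--             commands.append(" ")
--             break
--
--     return cursor_coords, commands
-- ===== SOURCE B (Python) =====
-- def move_cursor(cursor_coords, final_coords):
--     x, y = cursor_coords
--     tx, ty = final_coords[0][0], final_coords[0][1]
--     commands = ['a'] * (x - tx) if x > tx else ['d'] * (tx - x)
--     commands += ['w'] * (y - ty) if y > ty else ['s'] * (ty - y)
--     commands.append(' ')
--     return (tx, ty), commands
-- ===== Notes on version B (the rewrite author's own statement) =====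
-- stated objective: simpler
-- what changed: Replaced A's step-by-step while loop (moving one cell at a time and appending a command per step) with direct delta arithmetic: the command list is built at once by list multiplication from the coordinate differences.
import Mathlib
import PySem

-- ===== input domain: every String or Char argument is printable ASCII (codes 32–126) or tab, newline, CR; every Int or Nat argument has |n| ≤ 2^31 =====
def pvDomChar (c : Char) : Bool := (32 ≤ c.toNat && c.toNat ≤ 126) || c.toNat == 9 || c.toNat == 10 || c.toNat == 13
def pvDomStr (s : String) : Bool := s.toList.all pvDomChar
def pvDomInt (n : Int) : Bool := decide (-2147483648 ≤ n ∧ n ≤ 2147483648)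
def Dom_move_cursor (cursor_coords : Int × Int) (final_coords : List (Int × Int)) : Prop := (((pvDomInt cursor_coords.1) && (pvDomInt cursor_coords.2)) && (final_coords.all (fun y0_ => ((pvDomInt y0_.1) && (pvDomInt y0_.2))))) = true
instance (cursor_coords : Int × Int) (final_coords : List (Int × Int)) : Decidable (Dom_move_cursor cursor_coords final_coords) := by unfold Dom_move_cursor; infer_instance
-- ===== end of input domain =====

-- B replaces A's one-cell-per-iteration while loop with direct delta arithmetic (objective: simpler).
-- Note: in A, `cursor_coords != final_coords` compares a tuple with a list and is therefore always True
-- in Python; the loop only ever exits through the `break` after appending " ".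

-- ===== PORT A =====
-- the while loop of A: `tgt` is final_coords[0] (the only element A ever reads); the
-- `while cursor_coords != final_coords` condition is always True in Python (tuple ≠ list), so it is
-- not tested here; `fuel` is an exact totality guard (= the number of iterations the loop performs),
-- and the loop body is A's branch chain in A's order
def move_cursor_loop (fuel : Nat) (c : Int × Int) (tgt : Int × Int) (commands : List String) : (Int × Int) × List String :=
  match fuel with
  | 0 => (c, commands ++ [" "])
  | f + 1 =>
    if c.1 > tgt.1 then move_cursor_loop f (c.1 - 1, c.2) tgt (commands ++ ["a"])
    else if c.1 < tgt.1 then move_cursor_loop f (c.1 + 1, c.2) tgt (commands ++ ["d"])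
    else if c.2 > tgt.2 then move_cursor_loop f (c.1, c.2 - 1) tgt (commands ++ ["w"])
    else if c.2 < tgt.2 then move_cursor_loop f (c.1, c.2 + 1) tgt (commands ++ ["s"])
    else (c, commands ++ [" "])

def move_cursor (cursor_coords : Int × Int) (final_coords : List (Int × Int)) : (Int × Int) × List String :=
  match final_coords with
  | [] => (cursor_coords, [])          -- Python raises IndexError here; excluded by Pre_
  | tgt :: _ =>
    move_cursor_loop ((cursor_coords.1 - tgt.1).natAbs + (cursor_coords.2 - tgt.2).natAbs) cursor_coords tgt []

-- ===== PORT B =====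
def move_cursor_alt (cursor_coords : Int × Int) (final_coords : List (Int × Int)) : (Int × Int) × List String :=
  match final_coords with
  | [] => (cursor_coords, [])          -- Python raises IndexError here; excluded by Pre_
  | (tx, ty) :: _ =>
    let x := cursor_coords.1
    let y := cursor_coords.2
    let cmds₁ := if x > tx then List.replicate (x - tx).toNat "a" else List.replicate (tx - x).toNat "d"
    let cmds₂ := if y > ty then List.replicate (y - ty).toNat "w" else List.replicate (ty - y).toNat "s"
    ((tx, ty), cmds₁ ++ cmds₂ ++ [" "])

-- ===== PRECONDITION & SPEC =====
-- Pre_ excludes only the empty final_coords, on which A raises IndexError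
def Pre_move_cursor (cursor_coords : Int × Int) (final_coords : List (Int × Int)) : Prop := final_coords ≠ []
instance (cursor_coords : Int × Int) (final_coords : List (Int × Int)) : Decidable (Pre_move_cursor cursor_coords final_coords) := by unfold Pre_move_cursor; infer_instance
def pvWitness_move_cursor : (Int × Int) × (List (Int × Int)) := ((0, 0), [(2, -1)])

def Spec_move_cursor (cursor_coords : Int × Int) (final_coords : List (Int × Int)) (out : (Int × Int) × List String) : Prop := out = move_cursor_alt cursor_coords final_coords
instance (cursor_coords : Int × Int) (final_coords : List (Int × Int)) (out : (Int × Int) × List String) : Decidable (Spec_move_cursor cursor_coords final_coords out) := by unfold Spec_move_cursor; infer_instance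

-- ===== CLAIM (what is proved, stated in full; the proofs are below) =====
def Claim_equal_move_cursor : Prop := ∀ (cursor_coords : Int × Int) (final_coords : List (Int × Int)), Dom_move_cursor cursor_coords final_coords → Pre_move_cursor cursor_coords final_coords → Spec_move_cursor cursor_coords final_coords (move_cursor cursor_coords final_coords)

-- ===== LEMMAS AND PROOFS =====
def xcmds (x tx : Int) : List String :=
  if x > tx then List.replicate (x - tx).toNat "a" else List.replicate (tx - x).toNat "d"

def ycmds (y ty : Int) : List String :=
  if y > ty then List.replicate (y - ty).toNat "w" else List.replicate (ty - y).toNat "s"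

lemma xcmds_gt {x tx : Int} (h : x > tx) : xcmds x tx = "a" :: xcmds (x - 1) tx := by
  unfold xcmds
  by_cases h2 : x - 1 > tx
  · rw [if_pos h, if_pos h2]
    have e : (x - tx).toNat = (x - 1 - tx).toNat + 1 := by omega
    rw [e, List.replicate_succ]
  · rw [if_pos h, if_neg h2]
    have e1 : (x - tx).toNat = 1 := by omega
    have e2 : (tx - (x - 1)).toNat = 0 := by omega
    rw [e1, e2]; rfl

lemma xcmds_lt {x tx : Int} (h : x < tx) : xcmds x tx = "d" :: xcmds (x + 1) tx := by
  unfold xcmds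
  have h1 : ¬ x > tx := by omega
  have h2 : ¬ x + 1 > tx := by omega
  rw [if_neg h1, if_neg h2]
  have e : (tx - x).toNat = (tx - (x + 1)).toNat + 1 := by omega
  rw [e, List.replicate_succ]

lemma xcmds_eq {x tx : Int} (h : x = tx) : xcmds x tx = [] := by
  unfold xcmds
  have h1 : ¬ x > tx := by omega
  rw [if_neg h1]
  have e : (tx - x).toNat = 0 := by omega
  rw [e]; rfl

lemma ycmds_gt {y ty : Int} (h : y > ty) : ycmds y ty = "w" :: ycmds (y - 1) ty := by
  unfold ycmds
  by_cases h2 : y - 1 > ty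
  · rw [if_pos h, if_pos h2]
    have e : (y - ty).toNat = (y - 1 - ty).toNat + 1 := by omega
    rw [e, List.replicate_succ]
  · rw [if_pos h, if_neg h2]
    have e1 : (y - ty).toNat = 1 := by omega
    have e2 : (ty - (y - 1)).toNat = 0 := by omega
    rw [e1, e2]; rfl

lemma ycmds_lt {y ty : Int} (h : y < ty) : ycmds y ty = "s" :: ycmds (y + 1) ty := by
  unfold ycmds
  have h1 : ¬ y > ty := by omega
  have h2 : ¬ y + 1 > ty := by omega
  rw [if_neg h1, if_neg h2]
  have e : (ty - y).toNat = (ty - (y + 1)).toNat + 1 := by omega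
  rw [e, List.replicate_succ]

lemma ycmds_eq {y ty : Int} (h : y = ty) : ycmds y ty = [] := by
  unfold ycmds
  have h1 : ¬ y > ty := by omega
  rw [if_neg h1]
  have e : (ty - y).toNat = 0 := by omega
  rw [e]; rfl

lemma move_cursor_loop_eq (fuel : Nat) : ∀ (c tgt : Int × Int) (acc : List String),
    fuel = (c.1 - tgt.1).natAbs + (c.2 - tgt.2).natAbs →
    move_cursor_loop fuel c tgt acc = (tgt, acc ++ (xcmds c.1 tgt.1 ++ ycmds c.2 tgt.2 ++ [" "])) := by
  induction fuel with
  | zero =>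
    intro c tgt acc hf
    have h1 : c.1 = tgt.1 := by omega
    have h2 : c.2 = tgt.2 := by omega
    rw [move_cursor_loop, xcmds_eq h1, ycmds_eq h2]
    have hc : c = tgt := Prod.ext h1 h2
    rw [hc]
    simp only [List.nil_append]
  | succ f ih =>
    intro c tgt acc hf
    rw [move_cursor_loop]
    by_cases h1 : c.1 > tgt.1
    · rw [if_pos h1, ih _ _ _ (by simp only; omega), xcmds_gt h1]
      simp only [List.append_assoc, List.cons_append, List.nil_append]
    · rw [if_neg h1]
      by_cases h2 : c.1 < tgt.1
      · rw [if_pos h2, ih _ _ _ (by simp only; omega), xcmds_lt h2]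
        simp only [List.append_assoc, List.cons_append, List.nil_append]
      · rw [if_neg h2]
        have hx : c.1 = tgt.1 := by omega
        by_cases h3 : c.2 > tgt.2
        · rw [if_pos h3, ih _ _ _ (by simp only; omega), xcmds_eq hx, ycmds_gt h3]
          simp only [List.append_assoc, List.cons_append, List.nil_append, xcmds_eq hx]
        · rw [if_neg h3]
          by_cases h4 : c.2 < tgt.2
          · rw [if_pos h4, ih _ _ _ (by simp only; omega), xcmds_eq hx, ycmds_lt h4]
            simp only [List.append_assoc, List.cons_append, List.nil_append, xcmds_eq hx]
          · rw [if_neg h4]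
            have hy : c.2 = tgt.2 := by omega
            rw [xcmds_eq hx, ycmds_eq hy]
            have hc : c = tgt := Prod.ext hx hy
            rw [hc]
            simp only [List.nil_append]

-- ===== VERDICT (by name: the statement is the Claim_ definition above) =====
theorem move_cursor_spec : Claim_equal_move_cursor := by
  intro c fc _ hpre
  match fc with
  | [] => exact absurd rfl hpre
  | (tx, ty) :: rest =>
    show move_cursor c ((tx, ty) :: rest) = move_cursor_alt c ((tx, ty) :: rest)
    rw [move_cursor, move_cursor_alt, move_cursor_loop_eq _ _ _ _ rfl]
    simp only [List.nil_append, xcmds, ycmds]
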